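-- pv_equiv track=rewrite | github.com/anshultibby/finch | backend/routes/bots.py | _is_hidden_or_sensitive
-- ===== SOURCE A (Python) =====
-- HIDDEN_FILE_PATTERNS = {'.env', '.secret', '.credentials', '.aws', '.ssh', '.netrc', '.pgpass'}
--
-- def _is_hidden_or_sensitive(filepath: str) -> bool:
--     """Return True if a path component starts with '.' or matches sensitive patterns."""
--     parts = filepath.replace("\\", "/").split("/")
--     for part in parts:
--         if part.startswith('.'):
--             return True
--         if part.lower() in HIDDEN_FILE_PATTERNS:
--             return True
--     return False
-- ===== SOURCE B (Python) =====
-- def _is_hidden_or_sensitive(filepath: str) -> bool: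
--     """Return True if a path component starts with '.' or matches sensitive patterns."""
--     s = filepath.replace("\\", "/")
--     return s.startswith('.') or '/.' in s
-- ===== Notes on version B (the rewrite author's own statement) =====
-- stated objective: simpler
-- what changed: B drops the split-into-parts loop and the pattern set entirely: after normalizing backslashes it answers with a single substring test, s.startswith('.') or '/.' in s, which is equivalent because a component starts with '.' exactly when the string starts with '.' or contains '/.', and every HIDDEN_FILE_PATTERN itself starts with '.', making the set lookup redundant.
import Mathlib
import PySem

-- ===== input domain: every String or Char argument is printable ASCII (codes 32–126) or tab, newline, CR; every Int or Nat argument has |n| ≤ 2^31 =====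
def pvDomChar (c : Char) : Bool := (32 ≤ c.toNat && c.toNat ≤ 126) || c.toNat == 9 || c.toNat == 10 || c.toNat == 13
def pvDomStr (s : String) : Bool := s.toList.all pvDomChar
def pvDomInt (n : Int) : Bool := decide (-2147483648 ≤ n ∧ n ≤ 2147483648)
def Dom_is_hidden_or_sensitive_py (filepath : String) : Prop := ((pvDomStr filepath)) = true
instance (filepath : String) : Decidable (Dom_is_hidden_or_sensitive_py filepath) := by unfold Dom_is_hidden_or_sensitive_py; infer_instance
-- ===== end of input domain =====

-- B replaces A's split-into-parts loop with a single substring test (startswith '.' or '/.' in s);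
-- the sensitive-pattern set is redundant because every pattern itself starts with '.'. Objective: simpler.

-- ===== PORT A =====
-- the module constant HIDDEN_FILE_PATTERNS (a Python set of strings), as char lists
def pvHiddenFilePatterns : PySem.Set (List Char) :=
  PySem.Set.ofList [".env".toList, ".secret".toList, ".credentials".toList,
                    ".aws".toList, ".ssh".toList, ".netrc".toList, ".pgpass".toList]

-- the 'for part in parts: …' loop with its two early returns
def pvLoopA : List (List Char) → Bool
  | [] => false
  | part :: rest =>
    if PySem.Chars.startswith part ['.'] then true
    else if PySem.Set.contains pvHiddenFilePatterns (PySem.Chars.lower part) then true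
    else pvLoopA rest

def is_hidden_or_sensitive_py (filepath : String) : Bool :=
  let parts := PySem.Chars.splitOn (PySem.Chars.replace filepath.toList ['\\'] ['/']) ['/']
  pvLoopA parts

-- ===== PORT B =====
def is_hidden_or_sensitive_py_alt (filepath : String) : Bool :=
  let s := PySem.Chars.replace filepath.toList ['\\'] ['/']
  PySem.Chars.startswith s ['.'] || PySem.Chars.isIn ['/', '.'] s

-- ===== PRECONDITION & SPEC =====
def Spec_is_hidden_or_sensitive_py (filepath : String) (out : Bool) : Prop := out = is_hidden_or_sensitive_py_alt filepath
instance (filepath : String) (out : Bool) : Decidable (Spec_is_hidden_or_sensitive_py filepath out) := by unfold Spec_is_hidden_or_sensitive_py; infer_instance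

-- ===== CLAIM (what is proved, stated in full; the proofs are below) =====
def Claim_equal_is_hidden_or_sensitive_py : Prop := ∀ (filepath : String), Dom_is_hidden_or_sensitive_py filepath → Spec_is_hidden_or_sensitive_py filepath (is_hidden_or_sensitive_py filepath)

-- ===== LEMMAS AND PROOFS =====

-- structural model of s.split('/'): (first component, remaining components)
def pvSplit1 : List Char → List Char × List (List Char)
  | [] => ([], [])
  | c :: t =>
    let r := pvSplit1 t
    if c = '/' then ([], r.1 :: r.2) else (c :: r.1, r.2)

theorem pvSplitOn_go (fuel : Nat) : ∀ (l cur : List Char) (accl : List (List Char)),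
    l.length < fuel →
    PySem.Chars.splitOn.go ['/'] fuel l cur accl =
      accl.reverse ++ (cur.reverse ++ (pvSplit1 l).1) :: (pvSplit1 l).2 := by
  induction fuel with
  | zero => intro l cur accl h; omega
  | succ fuel ih =>
    intro l cur accl h
    cases l with
    | nil => simp [PySem.Chars.splitOn.go, pvSplit1]
    | cons c t =>
      rw [PySem.Chars.splitOn.go]
      by_cases hc : c = '/'
      · subst hc
        have hp : List.isPrefixOf ['/'] ('/' :: t) = true := by simp [List.isPrefixOf]
        rw [if_pos hp]
        have hdrop : List.drop (['/'] : List Char).length ('/' :: t) = t := rfl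
        rw [hdrop, ih t [] (cur.reverse :: accl) (by simpa using Nat.lt_of_succ_lt_succ h)]
        simp [pvSplit1]
      · have hp : List.isPrefixOf ['/'] (c :: t) = false := by
          simp [List.isPrefixOf]; exact fun hh => absurd hh.symm hc
        rw [if_neg (by simp [hp])]
        rw [ih t (c :: cur) accl (by simpa using Nat.lt_of_succ_lt_succ h)]
        simp [pvSplit1, hc]

theorem pvSplitOn_eq (cs : List Char) :
    PySem.Chars.splitOn cs ['/'] = (pvSplit1 cs).1 :: (pvSplit1 cs).2 := by
  unfold PySem.Chars.splitOn
  simpa using pvSplitOn_go (cs.length + 1) cs [] [] (by omega)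

-- the first component starts with '.' iff the whole string does
theorem pvHead_dot (cs : List Char) :
    PySem.Chars.startswith (pvSplit1 cs).1 ['.'] = PySem.Chars.startswith cs ['.'] := by
  cases cs with
  | nil => rfl
  | cons c t =>
    by_cases hc : c = '/'
    · subst hc; simp [pvSplit1, PySem.Chars.startswith, List.isPrefixOf]
    · simp [pvSplit1, hc, PySem.Chars.startswith, List.isPrefixOf]

-- a later component starts with '.' iff "/." occurs in the string
theorem pvTail_dot (cs : List Char) :
    ((pvSplit1 cs).2.any (fun p => PySem.Chars.startswith p ['.']) = true) ↔
      ['/', '.'] <:+: cs := by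
  induction cs with
  | nil => simp [pvSplit1]
  | cons c t ih =>
    by_cases hc : c = '/'
    · subst hc
      show (((pvSplit1 t).1 :: (pvSplit1 t).2).any (fun p => PySem.Chars.startswith p ['.']) = true) ↔ _
      rw [List.any_cons, Bool.or_eq_true, pvHead_dot t, List.infix_cons_iff]
      constructor
      · rintro (h | h)
        · exact Or.inl (List.cons_prefix_cons.mpr ⟨rfl, (PySem.Chars.startswith_iff t ['.']).mp h⟩)
        · exact Or.inr (ih.mp h)
      · rintro (h | h)
        · obtain ⟨-, h2⟩ := List.cons_prefix_cons.mp h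
          exact Or.inl ((PySem.Chars.startswith_iff t ['.']).mpr h2)
        · exact Or.inr (ih.mpr h)
    · have hsplit : pvSplit1 (c :: t) = (c :: (pvSplit1 t).1, (pvSplit1 t).2) := by
        simp [pvSplit1, hc]
      rw [hsplit]
      rw [List.infix_cons_iff]
      constructor
      · exact fun h => Or.inr (ih.mp h)
      · rintro (h | h)
        · exact absurd (List.cons_prefix_cons.mp h).1.symm hc
        · exact ih.mpr h
  
-- if part.lower() is a sensitive pattern then part starts with '.'
theorem pvLowerChar_dot (c : Char) (h : PySem.Chars.lowerChar c = '.') : c = '.' := by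
  unfold PySem.Chars.lowerChar at h
  split_ifs at h with hu
  · exfalso
    unfold PySem.Chars.isupper at hu
    simp only [Bool.and_eq_true, decide_eq_true_eq] at hu
    have h1 : 65 ≤ c.toNat := Nat.succ_le_of_lt hu.1
    have h2 : c.toNat ≤ 90 := hu.2
    have hv : (c.toNat + 32).isValidChar := by left; omega
    have h3 := congrArg Char.toNat h
    rw [Char.toNat_ofNat, if_pos hv] at h3
    have h4 : ('.' : Char).toNat = 46 := by decide
    omega
  · exact h

theorem pvPattern_dot (p : List Char)
    (h : PySem.Set.contains pvHiddenFilePatterns (PySem.Chars.lower p) = true) :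
    PySem.Chars.startswith p ['.'] = true := by
  have hdot : (PySem.Chars.lower p).head? = some '.' := by
    have hmem : PySem.Chars.lower p ∈ (pvHiddenFilePatterns : PySem.Set (List Char)) := by
      simpa [PySem.Set.contains] using h
    rw [pvHiddenFilePatterns, PySem.Set.mem_ofList] at hmem
    simp only [List.mem_cons, List.not_mem_nil, or_false] at hmem
    rcases hmem with h' | h' | h' | h' | h' | h' | h' <;> rw [h'] <;> rfl
  cases p with
  | nil => simp [PySem.Chars.lower] at hdot
  | cons c t =>
    simp only [PySem.Chars.lower, List.map_cons, List.head?_cons, Option.some.injEq] at hdot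
    have hc := pvLowerChar_dot c hdot
    subst hc
    simp [PySem.Chars.startswith, List.isPrefixOf]

theorem pvLoopA_eq_any (parts : List (List Char)) :
    pvLoopA parts = parts.any (fun p => PySem.Chars.startswith p ['.']) := by
  induction parts with
  | nil => rfl
  | cons p ps ih =>
    by_cases h1 : PySem.Chars.startswith p ['.'] = true
    · simp [pvLoopA, h1]
    · have h1' : PySem.Chars.startswith p ['.'] = false := by simpa using h1
      have h2 : PySem.Set.contains pvHiddenFilePatterns (PySem.Chars.lower p) = false := by
        by_contra hcontra
        exact h1 (pvPattern_dot p (by simpa using hcontra))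
      simp only [pvLoopA, h1', h2, Bool.false_eq_true, if_false, List.any_cons, Bool.false_or, ih]

-- ===== VERDICT (by name: the statement is the Claim_ definition above) =====
theorem is_hidden_or_sensitive_py_spec : Claim_equal_is_hidden_or_sensitive_py := by
  intro filepath _
  unfold Spec_is_hidden_or_sensitive_py
  unfold is_hidden_or_sensitive_py is_hidden_or_sensitive_py_alt
  simp only [pvSplitOn_eq, pvLoopA_eq_any, List.any_cons]
  set s := PySem.Chars.replace filepath.toList ['\\'] ['/']
  rw [pvHead_dot]
  by_cases hfix : ['/', '.'] <:+: s
  · have := (pvTail_dot s).mpr hfix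
    have hin : PySem.Chars.isIn ['/', '.'] s = true := (PySem.Chars.isIn_iff_infix _ _).mpr hfix
    simp [this, hin]
  · have h2 : ((pvSplit1 s).2.any (fun p => PySem.Chars.startswith p ['.'])) = false := by
      rw [Bool.eq_false_iff]
      intro hh
      exact hfix ((pvTail_dot s).mp hh)
    have hin : PySem.Chars.isIn ['/', '.'] s = false := by
      rw [PySem.Chars.isIn_eq_false_iff]; exact hfix
    simp [h2, hin]
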